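-- pv_equiv track=rewrite | github.com/orangfresh51/Raster_Dev_xyz | main.py | is_valid_hex_bytes
-- ===== SOURCE A (Python) =====
-- from typing import Any, Callable, Dict, List, Optional, Sequence, Tuple, Union
--
-- def is_valid_hex_bytes(s: str, byte_len: Optional[int] = None) -> bool:
--     if not s.startswith("0x"):
--         return False
--     h = s[2:]
--     if not all(c in "0123456789abcdefABCDEF" for c in h):
--         return False
--     if len(h) % 2 != 0:
--         return False
--     if byte_len is not None and len(h) // 2 != byte_len:
--         return False
--     return True
-- ===== SOURCE B (Python) =====
-- def _is_hex(c):
--     return '0' <= c <= '9' or 'a' <= c <= 'f' or 'A' <= c <= 'F'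
--
--
-- def is_valid_hex_bytes(s, byte_len=None):
--     if not s.startswith("0x"):
--         return False
--     n = 0
--     i = 2
--     while i < len(s):
--         if i + 1 == len(s) or not (_is_hex(s[i]) and _is_hex(s[i + 1])):
--             return False
--         n += 1
--         i += 2
--     return byte_len is None or n == byte_len
-- ===== Notes on version B (the rewrite author's own statement) =====
-- stated objective: alternative
-- what changed: A makes three separate passes (per-char membership in a 22-char string, length parity, length//2 comparison); B is a single recursive scan that consumes two characters at a time, validating range-based hex digits and counting byte pairs in one pass.
import Mathlib
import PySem

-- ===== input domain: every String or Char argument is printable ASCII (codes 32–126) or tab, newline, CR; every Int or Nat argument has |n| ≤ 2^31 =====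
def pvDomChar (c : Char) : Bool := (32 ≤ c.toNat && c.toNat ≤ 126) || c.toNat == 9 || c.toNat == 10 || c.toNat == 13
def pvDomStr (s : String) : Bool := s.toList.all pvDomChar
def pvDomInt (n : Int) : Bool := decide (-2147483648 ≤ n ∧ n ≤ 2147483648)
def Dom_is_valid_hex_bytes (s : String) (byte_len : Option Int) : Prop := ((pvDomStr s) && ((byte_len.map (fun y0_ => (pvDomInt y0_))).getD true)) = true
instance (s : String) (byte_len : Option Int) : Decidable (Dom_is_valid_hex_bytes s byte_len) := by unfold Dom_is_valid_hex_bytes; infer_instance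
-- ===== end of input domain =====

-- B replaces A's three passes (per-char membership, length parity, length//2 comparison) by a
-- single pairwise scan that validates and counts hex byte pairs in one pass (objective: alternative).

-- ===== PORT A =====
-- 'c in "0123456789abcdefABCDEF"' for a single character c is exactly char membership in the string's characters
def is_valid_hex_bytes (s : String) (byte_len : Option Int) : Bool :=
  if !(PySem.Str.startswith s "0x") then false
  else
    let h := PySem.Str.slice s (some 2) none
    if !(h.toList.all (fun c => decide (c ∈ "0123456789abcdefABCDEF".toList))) then false
    else if h.toList.length % 2 ≠ 0 then false
    else match byte_len with
      | some b => if PySem.Int.floordiv (h.toList.length : Int) 2 ≠ b then false else true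
      | none => true

-- ===== PORT B =====
def pvIsHex (c : Char) : Bool :=
  ('0' ≤ c && c ≤ '9') || ('a' ≤ c && c ≤ 'f') || ('A' ≤ c && c ≤ 'F')

-- B's while loop over indices i, i+1 (two chars per step, accumulator n) as structural recursion
def pvScan : List Char → Int → Option Int
  | [], n => some n
  | [_], _ => none
  | a :: b :: rest, n => if pvIsHex a && pvIsHex b then pvScan rest (n + 1) else none

def is_valid_hex_bytes_alt (s : String) (byte_len : Option Int) : Bool :=
  if !(PySem.Str.startswith s "0x") then false
  else match pvScan (PySem.Str.slice s (some 2) none).toList 0 with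
    | none => false
    | some n => match byte_len with
      | none => true
      | some b => n == b

-- ===== PRECONDITION & SPEC =====
def Spec_is_valid_hex_bytes (s : String) (byte_len : Option Int) (out : Bool) : Prop := out = is_valid_hex_bytes_alt s byte_len
instance (s : String) (byte_len : Option Int) (out : Bool) : Decidable (Spec_is_valid_hex_bytes s byte_len out) := by unfold Spec_is_valid_hex_bytes; infer_instance

-- ===== CLAIM (what is proved, stated in full; the proofs are below) =====
def Claim_equal_is_valid_hex_bytes : Prop := ∀ (s : String) (byte_len : Option Int), Dom_is_valid_hex_bytes s byte_len → Spec_is_valid_hex_bytes s byte_len (is_valid_hex_bytes s byte_len)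

-- ===== LEMMAS AND PROOFS =====

-- B's range test agrees with membership in A's 22-character string
theorem pvIsHex_eq_mem (c : Char) :
    (decide (c ∈ "0123456789abcdefABCDEF".toList)) = pvIsHex c := by
  have h : "0123456789abcdefABCDEF".toList = ['0','1','2','3','4','5','6','7','8','9','a','b','c','d','e','f','A','B','C','D','E','F'] := rfl
  have h0 : ('0' : Char).val.toNat = 48 := rfl; have h1 : ('1' : Char).val.toNat = 49 := rfl; have h2 : ('2' : Char).val.toNat = 50 := rfl; have h3 : ('3' : Char).val.toNat = 51 := rfl; have h4 : ('4' : Char).val.toNat = 52 := rfl; have h5 : ('5' : Char).val.toNat = 53 := rfl; have h6 : ('6' : Char).val.toNat = 54 := rfl; have h7 : ('7' : Char).val.toNat = 55 := rfl; have h8 : ('8' : Char).val.toNat = 56 := rfl; have h9 : ('9' : Char).val.toNat = 57 := rfl; have h10 : ('a' : Char).val.toNat = 97 := rfl; have h11 : ('b' : Char).val.toNat = 98 := rfl; have h12 : ('c' : Char).val.toNat = 99 := rfl; have h13 : ('d' : Char).val.toNat = 100 := rfl; have h14 : ('e' : Char).val.toNat = 101 := rfl; have h15 : ('f' : Char).val.toNat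 = 102 := rfl; have h16 : ('A' : Char).val.toNat = 65 := rfl; have h17 : ('B' : Char).val.toNat = 66 := rfl; have h18 : ('C' : Char).val.toNat = 67 := rfl; have h19 : ('D' : Char).val.toNat = 68 := rfl; have h20 : ('E' : Char).val.toNat = 69 := rfl; have h21 : ('F' : Char).val.toNat = 70 := rfl
  rw [h, Bool.eq_iff_iff]
  simp only [pvIsHex, List.mem_cons, List.not_mem_nil, or_false, decide_eq_true_eq,
    Bool.or_eq_true, Bool.and_eq_true, Char.le_def, Char.ext_iff, UInt32.le_iff_toNat_le,
    ← UInt32.toNat_inj]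
  omega

-- characterisation of the pairwise scan
theorem pvScan_spec (cs : List Char) (n : Int) :
    pvScan cs n =
      if cs.all pvIsHex ∧ cs.length % 2 = 0 then some (n + ((cs.length / 2 : Nat) : Int)) else none := by
  induction cs, n using pvScan.induct with
  | case1 n => simp [pvScan]
  | case2 n a => simp [pvScan]
  | case3 a b rest n hab ih =>
    rcases Bool.and_eq_true _ _ |>.mp hab with ⟨ha, hb⟩
    have hmod : (rest.length + 1 + 1) % 2 = rest.length % 2 := by omega
    have hdiv : (rest.length + 1 + 1) / 2 = rest.length / 2 + 1 := by omega
    simp only [pvScan, ih, List.all_cons, List.length_cons, ha, hb,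
      Bool.true_and, hmod, hdiv]
    by_cases h2 : rest.length % 2 = 0 <;> by_cases hr : rest.all pvIsHex = true <;>
      simp [h2, hr] <;> omega
  | case4 a b rest n hab =>
    have h' : (pvIsHex a && (pvIsHex b && rest.all pvIsHex)) = false := by
      cases ha : pvIsHex a <;> cases hb : pvIsHex b <;> simp_all
    simp [pvScan, hab, h']

-- ===== VERDICT (by name: the statement is the Claim_ definition above) =====
theorem is_valid_hex_bytes_spec : Claim_equal_is_valid_hex_bytes := by
  intro s byte_len _
  unfold Spec_is_valid_hex_bytes is_valid_hex_bytes is_valid_hex_bytes_alt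
  by_cases hs : PySem.Str.startswith s "0x"
  · simp only [hs, Bool.not_true, Bool.false_eq_true, if_false]
    set cs := (PySem.Str.slice s (some 2) none).toList with hcs
    rw [pvScan_spec]
    have hall : cs.all (fun c => decide (c ∈ "0123456789abcdefABCDEF".toList)) = cs.all pvIsHex := by
      simp only [pvIsHex_eq_mem]
    rw [hall]
    by_cases h1 : cs.all pvIsHex = true
    · by_cases h2 : cs.length % 2 = 0
      · simp only [h1, h2, and_self, if_true, Bool.not_true, Bool.false_eq_true, if_false]
        cases byte_len with
        | none => simp
        | some b =>
          have hfd : PySem.Int.floordiv (cs.length : Int) 2 = ((cs.length / 2 : Nat) : Int) := by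
            rw [PySem.Int.floordiv_eq_ediv_of_pos (by norm_num)]
            omega
          rw [hfd]
          by_cases hb : ((cs.length / 2 : Nat) : Int) = b
          · simp [hb]
          · rw [Bool.eq_iff_iff]
            simp [beq_iff_eq]
      · simp [h1, h2]
    · simp [h1]
  · rw [Bool.not_eq_true] at hs
    rw [hs]
    simp
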